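-- pv_equiv track=rewrite | github.com/colematt/advent-code | 2024/p2.py | isDampened
-- ===== SOURCE A (Python) =====
-- def isMonotonic(seq):
-- 	incr = decr = True
-- 	for i in range(len(seq) - 1):
-- 		if seq[i] < seq[i + 1]:
-- 			decr = False
-- 		if seq[i] > seq[i + 1]:
-- 			incr = False
-- 	return incr or decr
--
-- def isClamped(seq):
-- 	for i in range(len(seq) - 1):
-- 		if abs(seq[i] - seq[i+1]) > 3 or abs(seq[i] - seq[i+1]) < 1:
-- 			return False
-- 	return True
--
-- def isDampened(seq):
-- 	if isMonotonic(seq) and isClamped(seq):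
-- 		return True
-- 	else:
-- 		for i in range(len(seq)):
-- 			newseq = list(seq)
-- 			del newseq[i]
-- 			if isMonotonic(newseq) and isClamped(newseq):
-- 				return True
-- 		return False
-- ===== SOURCE B (Python) =====
-- def _safeDir(seq, lo, hi):
--     return all(lo <= seq[i + 1] - seq[i] <= hi for i in range(len(seq) - 1))
--
-- def _dampenedDir(seq, lo, hi):
--     # find the first adjacent pair whose step is outside [lo, hi]
--     j = next((i for i in range(len(seq) - 1)
--               if not (lo <= seq[i + 1] - seq[i] <= hi)), None)
--     if j is None:
--         return True
--     # only removing position j or j+1 can repair the first bad step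
--     return (_safeDir(seq[:j] + seq[j + 1:], lo, hi)
--             or _safeDir(seq[:j + 1] + seq[j + 2:], lo, hi))
--
-- def isDampened(seq):
--     return _dampenedDir(seq, 1, 3) or _dampenedDir(seq, -3, -1)
-- ===== Notes on version B (the rewrite author's own statement) =====
-- stated objective: faster
-- what changed: Instead of trying to delete every index and re-checking (quadratic), B finds the first adjacent step that breaks a direction (rise 1..3 or fall 1..3) and only tests deleting the two endpoints of that step, once per direction.
import Mathlib
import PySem

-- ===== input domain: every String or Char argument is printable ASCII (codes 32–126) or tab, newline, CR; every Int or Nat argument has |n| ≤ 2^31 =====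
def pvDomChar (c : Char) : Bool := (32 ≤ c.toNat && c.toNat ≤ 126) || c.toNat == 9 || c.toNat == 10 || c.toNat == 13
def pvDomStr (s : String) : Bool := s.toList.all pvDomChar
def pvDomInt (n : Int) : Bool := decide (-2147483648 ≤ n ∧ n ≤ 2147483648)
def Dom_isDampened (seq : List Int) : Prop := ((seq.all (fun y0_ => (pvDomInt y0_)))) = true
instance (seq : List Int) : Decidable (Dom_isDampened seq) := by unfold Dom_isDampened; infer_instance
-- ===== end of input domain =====

-- B replaces A's try-deleting-every-index scan by locating the first bad adjacent step per
-- direction and testing only the two deletions that can repair it (objective: faster).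

-- ===== PORT A =====
-- A's isMonotonic loop over adjacent pairs, carrying the (incr, decr) flags
def monoLoop (incr decr : Bool) : List Int → Bool × Bool
  | a :: b :: rest =>
      monoLoop (if a > b then false else incr) (if a < b then false else decr) (b :: rest)
  | _ => (incr, decr)

def isMonotonic (seq : List Int) : Bool :=
  let p := monoLoop true true seq
  p.1 || p.2

-- A's isClamped loop with its early return False
def isClamped : List Int → Bool
  | a :: b :: rest => if |a - b| > 3 ∨ |a - b| < 1 then false else isClamped (b :: rest)
  | _ => true

-- A's loop 'for i in range(len(seq))' with del newseq[i]
def dampLoop (seq : List Int) : List Nat → Bool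
  | [] => false
  | i :: rest =>
      if isMonotonic (seq.eraseIdx i) && isClamped (seq.eraseIdx i) then true
      else dampLoop seq rest

def isDampened (seq : List Int) : Bool :=
  if isMonotonic seq && isClamped seq then true
  else dampLoop seq (List.range seq.length)

-- ===== PORT B =====
-- Source B _safeDir: all adjacent steps within [lo, hi]
def safeDir (lo hi : Int) : List Int → Bool
  | a :: b :: rest => decide (lo ≤ b - a ∧ b - a ≤ hi) && safeDir lo hi (b :: rest)
  | _ => true

-- Source B's 'next(...)': index of the first adjacent step outside [lo, hi]
def firstBad (lo hi : Int) : List Int → Option Nat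
  | a :: b :: rest =>
      if lo ≤ b - a ∧ b - a ≤ hi then (firstBad lo hi (b :: rest)).map (· + 1)
      else some 0
  | _ => none

-- Source B _dampenedDir (seq[:j] + seq[j+1:] is seq.eraseIdx j)
def dampenedDir (seq : List Int) (lo hi : Int) : Bool :=
  match firstBad lo hi seq with
  | none => true
  | some j => safeDir lo hi (seq.eraseIdx j) || safeDir lo hi (seq.eraseIdx (j + 1))

def isDampened_alt (seq : List Int) : Bool :=
  dampenedDir seq 1 3 || dampenedDir seq (-3) (-1)

-- ===== PRECONDITION & SPEC =====
def Spec_isDampened (seq : List Int) (out : Bool) : Prop := out = isDampened_alt seq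
instance (seq : List Int) (out : Bool) : Decidable (Spec_isDampened seq out) := by unfold Spec_isDampened; infer_instance

-- ===== CLAIM (what is proved, stated in full; the proofs are below) =====
def Claim_equal_isDampened : Prop := ∀ (seq : List Int), Dom_isDampened seq → Spec_isDampened seq (isDampened seq)

-- ===== LEMMAS AND PROOFS =====

-- all adjacent pairs of s satisfy P
def PairP (P : Int → Int → Prop) (s : List Int) : Prop :=
  ∀ i (h : i + 1 < s.length), P s[i] s[i + 1]

theorem pairP_nil (P : Int → Int → Prop) : PairP P [] := by
  intro i h; simp at h

theorem pairP_single (P : Int → Int → Prop) (a : Int) : PairP P [a] := by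
  intro i h; simp at h

theorem pairP_cons (P : Int → Int → Prop) (a b : Int) (rest : List Int) :
    PairP P (a :: b :: rest) ↔ P a b ∧ PairP P (b :: rest) := by
  constructor
  · intro h
    refine ⟨by simpa using h 0 (by simp), fun i hi => ?_⟩
    have := h (i + 1) (by simpa using Nat.succ_lt_succ hi)
    simpa using this
  · rintro ⟨hab, h⟩ i hi
    cases i with
    | zero => simpa using hab
    | succ i =>
        have := h i (by simpa using Nat.lt_of_succ_lt_succ hi)
        simpa using this

theorem safeDir_iff (lo hi : Int) (s : List Int) :
    safeDir lo hi s = true ↔ PairP (fun a b => lo ≤ b - a ∧ b - a ≤ hi) s := by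
  induction s with
  | nil => simp [safeDir, pairP_nil]
  | cons a t ih =>
      cases t with
      | nil => simp [safeDir, pairP_single]
      | cons b rest =>
          simp [safeDir, pairP_cons, ih]

theorem firstBad_none (lo hi : Int) (s : List Int) (h : firstBad lo hi s = none) :
    PairP (fun a b => lo ≤ b - a ∧ b - a ≤ hi) s := by
  induction s with
  | nil => exact pairP_nil _
  | cons a t ih =>
      cases t with
      | nil => exact pairP_single _ _
      | cons b rest =>
          rw [pairP_cons]
          unfold firstBad at h
          split at h
          · rename_i hg
            refine ⟨hg, ih ?_⟩
            cases hfb : firstBad lo hi (b :: rest) with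
            | none => rfl
            | some j => rw [hfb] at h; simp at h
          · simp at h

theorem firstBad_some_lt (lo hi : Int) (s : List Int) (j : Nat)
    (h : firstBad lo hi s = some j) : j + 1 < s.length := by
  induction s generalizing j with
  | nil => simp [firstBad] at h
  | cons a t ih =>
      cases t with
      | nil => simp [firstBad] at h
      | cons b rest =>
          unfold firstBad at h
          split at h
          · cases hfb : firstBad lo hi (b :: rest) with
            | none => rw [hfb] at h; simp at h
            | some k =>
                rw [hfb] at h; simp at h
                have := ih k hfb
                simp only [List.length_cons] at this ⊢
                omega
          · simp at h
            simp only [List.length_cons]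
            omega

theorem firstBad_some_bad (lo hi : Int) (s : List Int) (j : Nat)
    (h : firstBad lo hi s = some j) (hlt : j + 1 < s.length) :
    ¬ (lo ≤ s[j + 1] - s[j] ∧ s[j + 1] - s[j] ≤ hi) := by
  induction s generalizing j with
  | nil => simp [firstBad] at h
  | cons a t ih =>
      cases t with
      | nil => simp [firstBad] at h
      | cons b rest =>
          unfold firstBad at h
          split at h
          · cases hfb : firstBad lo hi (b :: rest) with
            | none => rw [hfb] at h; simp at h
            | some k =>
                rw [hfb] at h; simp at h
                subst h
                have hk : k + 1 < (b :: rest).length := by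
                  have := firstBad_some_lt lo hi (b :: rest) k hfb
                  exact this
                have := ih k hfb hk
                simpa using this
          · rename_i hcond
            simp at h
            subst h
            simpa using hcond

-- removing any index other than j or j+1 keeps the bad pair (j, j+1) adjacent
theorem not_pairP_erase (P : Int → Int → Prop) (s : List Int) (j : Nat)
    (hj : j + 1 < s.length) (hbad : ¬ P (s[j]'(by omega)) (s[j + 1]'hj))
    (i : Nat) (hij : i ≠ j) (hij1 : i ≠ j + 1) :
    ¬ PairP P (s.eraseIdx i) := by
  intro hp
  rcases Nat.lt_or_ge i j with hlt | hge
  · obtain ⟨m, rfl⟩ : ∃ m, j = m + 1 := ⟨j - 1, by omega⟩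
    have hlen : m + 1 < (s.eraseIdx i).length := by
      rw [List.length_eraseIdx]; split <;> omega
    have hpm := hp m hlen
    rw [List.getElem_eraseIdx, List.getElem_eraseIdx] at hpm
    rw [dif_neg (by omega), dif_neg (by omega)] at hpm
    exact hbad hpm
  · have hlen : j + 1 < (s.eraseIdx i).length := by
      rw [List.length_eraseIdx]; split <;> omega
    have hpj := hp j hlen
    rw [List.getElem_eraseIdx, List.getElem_eraseIdx] at hpj
    rw [dif_pos (by omega), dif_pos (by omega)] at hpj
    exact hbad hpj

theorem dampenedDir_iff (lo hi : Int) (s : List Int) :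
    dampenedDir s lo hi = true ↔
      PairP (fun a b => lo ≤ b - a ∧ b - a ≤ hi) s ∨
        ∃ i < s.length, PairP (fun a b => lo ≤ b - a ∧ b - a ≤ hi) (s.eraseIdx i) := by
  unfold dampenedDir
  cases hfb : firstBad lo hi s with
  | none =>
      constructor
      · intro _; exact Or.inl (firstBad_none _ _ _ hfb)
      · intro _; rfl
  | some j =>
      have hlt := firstBad_some_lt lo hi s j hfb
      have hbad := firstBad_some_bad lo hi s j hfb hlt
      simp only [Bool.or_eq_true, safeDir_iff]
      constructor
      · rintro (h | h)
        · exact Or.inr ⟨j, by omega, h⟩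
        · exact Or.inr ⟨j + 1, by omega, h⟩
      · rintro (h | ⟨i, hi, h⟩)
        · exact absurd (h j hlt) hbad
        · by_cases hij : i = j
          · subst hij; exact Or.inl h
          · by_cases hij1 : i = j + 1
            · subst hij1; exact Or.inr h
            · exact absurd h (not_pairP_erase _ s j hlt hbad i hij hij1)

theorem monoLoop_eq (s : List Int) : ∀ incr decr,
    monoLoop incr decr s = (incr && (monoLoop true true s).1, decr && (monoLoop true true s).2) := by
  induction s with
  | nil => intro incr decr; simp [monoLoop]
  | cons a t ih =>
      cases t with
      | nil => intro incr decr; simp [monoLoop]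
      | cons b rest =>
          intro incr decr
          simp only [monoLoop]
          rw [ih (if a > b then false else incr) (if a < b then false else decr),
            ih (if a > b then false else true) (if a < b then false else true)]
          by_cases h1 : a > b <;> by_cases h2 : a < b <;> simp [h1, h2]

theorem monoLoop_fst (s : List Int) :
    (monoLoop true true s).1 = true ↔ PairP (· ≤ ·) s := by
  induction s with
  | nil => simp [monoLoop, pairP_nil]
  | cons a t ih =>
      cases t with
      | nil => simp [monoLoop, pairP_single]
      | cons b rest =>
          simp only [monoLoop]
          rw [monoLoop_eq (b :: rest), pairP_cons]
          by_cases h : a > b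
          · refine iff_of_false (by simp [h]) ?_
            rintro ⟨hab, _⟩; omega
          · simp only [if_neg h, Bool.true_and]
            rw [ih]
            constructor
            · intro hp; exact ⟨by omega, hp⟩
            · rintro ⟨_, hp⟩; exact hp

theorem monoLoop_snd (s : List Int) :
    (monoLoop true true s).2 = true ↔ PairP (fun a b => b ≤ a) s := by
  induction s with
  | nil => simp [monoLoop, pairP_nil]
  | cons a t ih =>
      cases t with
      | nil => simp [monoLoop, pairP_single]
      | cons b rest =>
          simp only [monoLoop]
          rw [monoLoop_eq (b :: rest), pairP_cons]
          by_cases h : a < b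
          · refine iff_of_false (by simp [h]) ?_
            rintro ⟨hab, _⟩; omega
          · simp only [if_neg h, Bool.true_and]
            rw [ih]
            constructor
            · intro hp; exact ⟨by omega, hp⟩
            · rintro ⟨_, hp⟩; exact hp

theorem isMonotonic_iff (s : List Int) :
    isMonotonic s = true ↔ PairP (· ≤ ·) s ∨ PairP (fun a b => b ≤ a) s := by
  unfold isMonotonic
  rw [Bool.or_eq_true, monoLoop_fst, monoLoop_snd]

theorem isClamped_iff (s : List Int) :
    isClamped s = true ↔ PairP (fun a b => 1 ≤ |a - b| ∧ |a - b| ≤ 3) s := by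
  induction s with
  | nil => simp [isClamped, pairP_nil]
  | cons a t ih =>
      cases t with
      | nil => simp [isClamped, pairP_single]
      | cons b rest =>
          rw [pairP_cons]
          unfold isClamped
          split
        
          · rename_i hcond
            constructor
            · intro h; simp at h
            · rintro ⟨h1, _⟩; omega
          · rename_i hcond
            push Not at hcond
            simp [ih]
            intro _
            constructor
            · omega
            · omega

theorem safe_iff (s : List Int) :
    (isMonotonic s && isClamped s) = true ↔
      PairP (fun a b => (1:Int) ≤ b - a ∧ b - a ≤ 3) s ∨
        PairP (fun a b => (-3:Int) ≤ b - a ∧ b - a ≤ -1) s := by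
  rw [Bool.and_eq_true, isMonotonic_iff, isClamped_iff]
  constructor
  · rintro ⟨hm | hm, hc⟩
    · left; intro i hi
      have h1 := hm i hi
      obtain ⟨h2, h3⟩ := hc i hi
      rcases abs_cases (s[i] - s[i + 1]) with ⟨he, _⟩ | ⟨he, _⟩ <;> rw [he] at h2 h3 <;>
        constructor <;> omega
    · right; intro i hi
      have h1 := hm i hi
      obtain ⟨h2, h3⟩ := hc i hi
      rcases abs_cases (s[i] - s[i + 1]) with ⟨he, _⟩ | ⟨he, _⟩ <;> rw [he] at h2 h3 <;>
        constructor <;> omega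
  · rintro (h | h)
    · refine ⟨Or.inl fun i hi => ?_, fun i hi => ?_⟩
      · obtain ⟨h1, h2⟩ := h i hi; omega
      · obtain ⟨h1, h2⟩ := h i hi
        rcases abs_cases (s[i] - s[i + 1]) with ⟨he, _⟩ | ⟨he, _⟩ <;> rw [he] <;>
          constructor <;> omega
    · refine ⟨Or.inr fun i hi => ?_, fun i hi => ?_⟩
      · obtain ⟨h1, h2⟩ := h i hi; omega
      · obtain ⟨h1, h2⟩ := h i hi
        rcases abs_cases (s[i] - s[i + 1]) with ⟨he, _⟩ | ⟨he, _⟩ <;> rw [he] <;>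
          constructor <;> omega

theorem dampLoop_iff (seq : List Int) (l : List Nat) :
    dampLoop seq l = true ↔
      ∃ i ∈ l, (isMonotonic (seq.eraseIdx i) && isClamped (seq.eraseIdx i)) = true := by
  induction l with
  | nil => simp [dampLoop]
  | cons i rest ih =>
      unfold dampLoop
      split
      · rename_i h
        constructor
        · intro _; exact ⟨i, List.mem_cons_self, h⟩
        · intro _; rfl
      · rename_i h
        rw [ih]
        constructor
        · rintro ⟨k, hk, hs⟩; exact ⟨k, by simp [hk], hs⟩
        · rintro ⟨k, hk, hs⟩
          rcases List.mem_cons.mp hk with rfl | hk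
          · exact absurd hs h
          · exact ⟨k, hk, hs⟩

-- ===== VERDICT (by name: the statement is the Claim_ definition above) =====
theorem isDampened_iff (seq : List Int) :
    isDampened seq = true ↔
      (isMonotonic seq && isClamped seq) = true ∨
        ∃ i < seq.length, (isMonotonic (seq.eraseIdx i) && isClamped (seq.eraseIdx i)) = true := by
  unfold isDampened
  split
  · rename_i h; simp [h]
  · rename_i h
    rw [dampLoop_iff]
    constructor
    · rintro ⟨i, hi, hs⟩; exact Or.inr ⟨i, List.mem_range.mp hi, hs⟩
    · rintro (hs | ⟨i, hi, hs⟩)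
      · exact absurd hs h
      · exact ⟨i, List.mem_range.mpr hi, hs⟩

theorem isDampened_spec : Claim_equal_isDampened := by
  intro seq _
  unfold Spec_isDampened
  have key : isDampened seq = true ↔ isDampened_alt seq = true := by
    rw [isDampened_iff]
    unfold isDampened_alt
    rw [Bool.or_eq_true, dampenedDir_iff, dampenedDir_iff]
    simp only [safe_iff]
    constructor
    · rintro ((h | h) | ⟨i, hi, (h | h)⟩)
      · exact Or.inl (Or.inl h)
      · exact Or.inr (Or.inl h)
      · exact Or.inl (Or.inr ⟨i, hi, h⟩)
      · exact Or.inr (Or.inr ⟨i, hi, h⟩)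
    · rintro ((h | ⟨i, hi, h⟩) | (h | ⟨i, hi, h⟩))
      · exact Or.inl (Or.inl h)
      · exact Or.inr ⟨i, hi, Or.inl h⟩
      · exact Or.inl (Or.inr h)
      · exact Or.inr ⟨i, hi, Or.inr h⟩
  cases h1 : isDampened seq <;> cases h2 : isDampened_alt seq <;> simp_all
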